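-- pv_equiv track=rewrite | github.com/madeofants/Permut8-Firmware-Tutorial | archive/phase3-analysis/final_analysis.py | classify_preset_complexity
-- ===== SOURCE A (Python) =====
-- def classify_preset_complexity(preset_names):
--     """Classify preset complexity based on naming patterns"""
--     categories = {
--         'musical': 0,
--         'technical': 0,
--         'creative': 0,
--         'basic': 0
--     }
--
--     musical_words = ['organ', 'reverb', 'pad', 'sine', 'arp', 'chord', 'bass', 'lead', 'rhythm']
--     technical_words = ['filter', 'delay', 'mod', 'feedback', 'frequency', 'sync', 'gate']
--     creative_words = ['crazy', 'weird', 'evil', 'magic', 'strange', 'alien', 'robot']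
--     basic_words = ['basic', 'simple', 'clean', 'original', 'standard']
--
--     for _, name in preset_names:
--         name_lower = name.lower()
--         if any(word in name_lower for word in musical_words):
--             categories['musical'] += 1
--         elif any(word in name_lower for word in technical_words):
--             categories['technical'] += 1
--         elif any(word in name_lower for word in creative_words):
--             categories['creative'] += 1
--         elif any(word in name_lower for word in basic_words):
--             categories['basic'] += 1
--         else:
--             categories['creative'] += 1  # Default to creative for unique names
--
--     return categories
-- ===== SOURCE B (Python) =====
-- _TABLE = [
--     ('musical', ['organ', 'reverb', 'pad', 'sine', 'arp', 'chord', 'bass', 'lead', 'rhythm']),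
--     ('technical', ['filter', 'delay', 'mod', 'feedback', 'frequency', 'sync', 'gate']),
--     ('creative', ['crazy', 'weird', 'evil', 'magic', 'strange', 'alien', 'robot']),
--     ('basic', ['basic', 'simple', 'clean', 'original', 'standard']),
-- ]
--
--
-- def _matches(n, words):
--     return any(w in n for w in words)
--
--
-- def classify_preset_complexity(preset_names):
--     # staged sieve: one pass per category over the names not yet claimed
--     remaining = [name.lower() for _, name in preset_names]
--     counts = {}
--     for cat, words in _TABLE:
--         counts[cat] = len([n for n in remaining if _matches(n, words)])
--         remaining = [n for n in remaining if not _matches(n, words)]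
--     counts['creative'] += len(remaining)
--     return counts
-- ===== Notes on version B (the rewrite author's own statement) =====
-- stated objective: alternative
-- what changed: Replaces A's single pass with a per-name if/elif cascade over a mutable counter dict by a staged sieve: one filtering pass per category in precedence order over the names not yet claimed, counting the hits at each stage and routing the leftover names to 'creative'.
import Mathlib
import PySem

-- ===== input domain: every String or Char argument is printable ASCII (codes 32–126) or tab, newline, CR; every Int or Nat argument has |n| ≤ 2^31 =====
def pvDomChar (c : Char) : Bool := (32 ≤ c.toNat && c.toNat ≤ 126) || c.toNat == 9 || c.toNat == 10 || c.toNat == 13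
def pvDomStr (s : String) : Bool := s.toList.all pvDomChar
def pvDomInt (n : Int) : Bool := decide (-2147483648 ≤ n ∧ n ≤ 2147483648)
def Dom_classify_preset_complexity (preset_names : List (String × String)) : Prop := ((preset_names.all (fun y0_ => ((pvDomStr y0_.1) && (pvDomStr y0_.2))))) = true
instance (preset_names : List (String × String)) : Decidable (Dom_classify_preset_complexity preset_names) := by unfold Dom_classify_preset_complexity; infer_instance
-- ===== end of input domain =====

-- B replaces A's single per-name if/elif cascade over a counter dict by a staged sieve:
-- one filtering pass per category in precedence order over the names not yet claimed,
-- counting hits per stage and routing leftovers to 'creative' (objective: alternative).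

-- ===== PORT A =====
def pvMusicalWords : List String := ["organ", "reverb", "pad", "sine", "arp", "chord", "bass", "lead", "rhythm"]
def pvTechnicalWords : List String := ["filter", "delay", "mod", "feedback", "frequency", "sync", "gate"]
def pvCreativeWords : List String := ["crazy", "weird", "evil", "magic", "strange", "alien", "robot"]
def pvBasicWords : List String := ["basic", "simple", "clean", "original", "standard"]

-- `categories[k] += 1` on an always-present key = Dict.modify k 0 (· + 1) (exact here: all four keys are in the dict)
def pvStepA (d : PySem.Dict String Int) (p : String × String) : PySem.Dict String Int :=
  let name_lower := PySem.Str.lower p.2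
  if pvMusicalWords.any (fun w => PySem.Str.isIn w name_lower) then d.modify "musical" 0 (· + 1)
  else if pvTechnicalWords.any (fun w => PySem.Str.isIn w name_lower) then d.modify "technical" 0 (· + 1)
  else if pvCreativeWords.any (fun w => PySem.Str.isIn w name_lower) then d.modify "creative" 0 (· + 1)
  else if pvBasicWords.any (fun w => PySem.Str.isIn w name_lower) then d.modify "basic" 0 (· + 1)
  else d.modify "creative" 0 (· + 1)

def classify_preset_complexity (preset_names : List (String × String)) : List (String × Int) :=
  (preset_names.foldl pvStepA
    ((((PySem.Dict.empty.insert "musical" 0).insert "technical" 0).insert "creative" 0).insert "basic" 0)).items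

-- ===== PORT B =====
def pvTable : List (String × List String) :=
  [("musical", ["organ", "reverb", "pad", "sine", "arp", "chord", "bass", "lead", "rhythm"]),
   ("technical", ["filter", "delay", "mod", "feedback", "frequency", "sync", "gate"]),
   ("creative", ["crazy", "weird", "evil", "magic", "strange", "alien", "robot"]),
   ("basic", ["basic", "simple", "clean", "original", "standard"])]

def pvMatches (n : String) (ws : List String) : Bool := ws.any (fun w => PySem.Str.isIn w n)

-- the loop over _TABLE: each stage counts the hits in the remaining names and removes them
def pvStages : List String → List (String × List String) → List (String × Int) × List String
  | rem, [] => ([], rem)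
  | rem, (c, ws) :: rest =>
      let cnt : Int := (rem.filter (fun n => pvMatches n ws)).length
      let rem' := rem.filter (fun n => !(pvMatches n ws))
      let (acc, rf) := pvStages rem' rest
      ((c, cnt) :: acc, rf)

def classify_preset_complexity_alt (preset_names : List (String × String)) : List (String × Int) :=
  let remaining := preset_names.map (fun p => PySem.Str.lower p.2)
  let (counts, rem) := pvStages remaining pvTable
  -- counts['creative'] += len(remaining): in-place value update of the dict entry
  counts.map (fun kv => if kv.1 = "creative" then (kv.1, kv.2 + (rem.length : Int)) else kv)

-- ===== PRECONDITION & SPEC =====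
def Spec_classify_preset_complexity (preset_names : List (String × String)) (out : List (String × Int)) : Prop := out = classify_preset_complexity_alt preset_names
instance (preset_names : List (String × String)) (out : List (String × Int)) : Decidable (Spec_classify_preset_complexity preset_names out) := by unfold Spec_classify_preset_complexity; infer_instance

-- ===== CLAIM (what is proved, stated in full; the proofs are below) =====
def Claim_equal_classify_preset_complexity : Prop := ∀ (preset_names : List (String × String)), Dom_classify_preset_complexity preset_names → Spec_classify_preset_complexity preset_names (classify_preset_complexity preset_names)

-- ===== LEMMAS AND PROOFS =====

-- per-category match predicates on a (lowered) name
def pM (n : String) : Bool := pvMusicalWords.any (fun w => PySem.Str.isIn w n)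
def pT (n : String) : Bool := pvTechnicalWords.any (fun w => PySem.Str.isIn w n)
def pC (n : String) : Bool := pvCreativeWords.any (fun w => PySem.Str.isIn w n)
def pB (n : String) : Bool := pvBasicWords.any (fun w => PySem.Str.isIn w n)

def pvLow (p : String × String) : String := PySem.Str.lower p.2

-- the A-loop invariant: folding A's step adds, to each key, the number of names whose
-- first matching stage is that key (creative = its own stage plus the unmatched names)
theorem pvKey (l : List (String × String)) : ∀ (a b c d : Int),
    (l.foldl pvStepA (PySem.Dict.mk [("musical", a), ("technical", b), ("creative", c), ("basic", d)])).items
    = [("musical", a + (l.countP (fun p => pM (pvLow p)) : Int)),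
       ("technical", b + (l.countP (fun p => pT (pvLow p) && !pM (pvLow p)) : Int)),
       ("creative", c + (l.countP (fun p => pC (pvLow p) && (!pT (pvLow p) && !pM (pvLow p))) : Int)
          + (l.countP (fun p => !pB (pvLow p) && (!pC (pvLow p) && (!pT (pvLow p) && !pM (pvLow p)))) : Int)),
       ("basic", d + (l.countP (fun p => pB (pvLow p) && (!pC (pvLow p) && (!pT (pvLow p) && !pM (pvLow p)))) : Int))] := by
  induction l with
  | nil => intro a b c d; simp
  | cons x xs ih =>
    intro a b c d
    simp only [List.foldl_cons, List.countP_cons]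
    by_cases h1 : pM (pvLow x) = true
    · have hs : pvStepA (PySem.Dict.mk [("musical", a), ("technical", b), ("creative", c), ("basic", d)]) x
          = PySem.Dict.mk [("musical", a + 1), ("technical", b), ("creative", c), ("basic", d)] := by
        simp only [pvStepA]
        rw [if_pos (by simpa [pM, pvLow] using h1)]
        simp [PySem.Dict.modify, PySem.Dict.insert, PySem.Dict.getD, PySem.Dict.get?, PySem.Dict.contains]
      rw [hs, ih]
      simp [h1]
      omega
    · by_cases h2 : pT (pvLow x) = true
      · have hs : pvStepA (PySem.Dict.mk [("musical", a), ("technical", b), ("creative", c), ("basic", d)]) x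
            = PySem.Dict.mk [("musical", a), ("technical", b + 1), ("creative", c), ("basic", d)] := by
          simp only [pvStepA]
          rw [if_neg (by simpa [pM, pvLow] using h1), if_pos (by simpa [pT, pvLow] using h2)]
          simp [PySem.Dict.modify, PySem.Dict.insert, PySem.Dict.getD, PySem.Dict.get?, PySem.Dict.contains]
        rw [hs, ih]
        simp [h1, h2]
        omega
      · by_cases h3 : pC (pvLow x) = true
        · have hs : pvStepA (PySem.Dict.mk [("musical", a), ("technical", b), ("creative", c), ("basic", d)]) x
              = PySem.Dict.mk [("musical", a), ("technical", b), ("creative", c + 1), ("basic", d)] := by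
            simp only [pvStepA]
            rw [if_neg (by simpa [pM, pvLow] using h1), if_neg (by simpa [pT, pvLow] using h2),
               if_pos (by simpa [pC, pvLow] using h3)]
            simp [PySem.Dict.modify, PySem.Dict.insert, PySem.Dict.getD, PySem.Dict.get?, PySem.Dict.contains]
          rw [hs, ih]
          simp [h1, h2, h3]
          omega
        · by_cases h4 : pB (pvLow x) = true
          · have hs : pvStepA (PySem.Dict.mk [("musical", a), ("technical", b), ("creative", c), ("basic", d)]) x
                = PySem.Dict.mk [("musical", a), ("technical", b), ("creative", c), ("basic", d + 1)] := by
              simp only [pvStepA]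
              rw [if_neg (by simpa [pM, pvLow] using h1), if_neg (by simpa [pT, pvLow] using h2),
                 if_neg (by simpa [pC, pvLow] using h3), if_pos (by simpa [pB, pvLow] using h4)]
              simp [PySem.Dict.modify, PySem.Dict.insert, PySem.Dict.getD, PySem.Dict.get?, PySem.Dict.contains]
            rw [hs, ih]
            simp [h1, h2, h3, h4]
            omega
          · have hs : pvStepA (PySem.Dict.mk [("musical", a), ("technical", b), ("creative", c), ("basic", d)]) x
                = PySem.Dict.mk [("musical", a), ("technical", b), ("creative", c + 1), ("basic", d)] := by
              simp only [pvStepA]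
              rw [if_neg (by simpa [pM, pvLow] using h1), if_neg (by simpa [pT, pvLow] using h2),
                 if_neg (by simpa [pC, pvLow] using h3), if_neg (by simpa [pB, pvLow] using h4)]
              simp [PySem.Dict.modify, PySem.Dict.insert, PySem.Dict.getD, PySem.Dict.get?, PySem.Dict.contains]
            rw [hs, ih]
            simp [h1, h2, h3, h4]
            omega

-- B's staged sieve, characterised by the same five counts
theorem pvAltEq (l : List (String × String)) :
    classify_preset_complexity_alt l
    = [("musical", (l.countP (fun p => pM (pvLow p)) : Int)),
       ("technical", (l.countP (fun p => pT (pvLow p) && !pM (pvLow p)) : Int)),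
       ("creative", (l.countP (fun p => pC (pvLow p) && (!pT (pvLow p) && !pM (pvLow p))) : Int)
          + (l.countP (fun p => !pB (pvLow p) && (!pC (pvLow p) && (!pT (pvLow p) && !pM (pvLow p)))) : Int)),
       ("basic", (l.countP (fun p => pB (pvLow p) && (!pC (pvLow p) && (!pT (pvLow p) && !pM (pvLow p)))) : Int))] := by
  simp only [classify_preset_complexity_alt, pvStages, pvTable, List.filter_filter,
    ← List.countP_eq_length_filter, List.countP_map]
  simp [pvMatches, pM, pT, pC, pB, pvLow, Function.comp_def, pvMusicalWords, pvTechnicalWords,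
    pvCreativeWords, pvBasicWords, List.any_cons, List.any_nil, Bool.not_or]

-- ===== VERDICT (by name: the statement is the Claim_ definition above) =====
theorem classify_preset_complexity_spec : Claim_equal_classify_preset_complexity := by
  intro l _
  unfold Spec_classify_preset_complexity classify_preset_complexity
  have h0 : ((((PySem.Dict.empty.insert "musical" (0:Int)).insert "technical" 0).insert "creative" 0).insert "basic" 0)
      = PySem.Dict.mk [("musical", 0), ("technical", 0), ("creative", 0), ("basic", 0)] := by decide
  rw [h0, pvKey, pvAltEq]
  simp
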